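-- pv_equiv track=rewrite | github.com/kianadane/dane_msds | functions_ccdc.py | comb_truth_lists
-- ===== SOURCE A (Python) =====
-- def comb_truth_lists(sel1, sel2):
--     """
--     Combines two Boolean lists, replacing `True` values in `sel1` with corresponding values from `sel2`.
--
--     Parameters:
--     - sel1 (list of bool): Primary Boolean list.
--     - sel2 (list of bool): Secondary Boolean list, used to replace `True` values in `sel1`.
--
--     Returns:
--     - list: Combined Boolean list of the same length as `sel1`.
--     """
--     sel2_combined = []
--     c = 0  # Counter for sel2 index
--
--
--     for i in range(len(sel1)):
--         if not sel1[i]:  # If sel1[i] is False, retain False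
--             sel2_combined.append(False)
--         else:
--             if c < len(sel2):  # Ensure we do not exceed sel2 length
--                 sel2_combined.append(sel2[c])
--                 c += 1
--             else:
--                 raise ValueError("Mismatch: `sel2` has fewer elements than expected based on `sel1`.")
--
--     return sel2_combined
-- ===== SOURCE B (Python) =====
-- def comb_truth_lists(sel1, sel2):
--     pos = [i for i, x in enumerate(sel1) if x]
--     if len(pos) > len(sel2):
--         raise ValueError("Mismatch: `sel2` has fewer elements than expected based on `sel1`.")
--     out = [False] * len(sel1)
--     for i, v in zip(pos, sel2):
--         out[i] = v
--     return out
-- ===== Notes on version B (the rewrite author's own statement) =====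
-- stated objective: alternative
-- what changed: Replaced A's fused sequential scan (counter into sel2, in-loop raise, append-built output) by an index-scatter algorithm: collect the positions of truthy entries, validate the count once, allocate an all-False output of the right length, and scatter sel2's values into those positions by assignment.
import Mathlib
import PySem

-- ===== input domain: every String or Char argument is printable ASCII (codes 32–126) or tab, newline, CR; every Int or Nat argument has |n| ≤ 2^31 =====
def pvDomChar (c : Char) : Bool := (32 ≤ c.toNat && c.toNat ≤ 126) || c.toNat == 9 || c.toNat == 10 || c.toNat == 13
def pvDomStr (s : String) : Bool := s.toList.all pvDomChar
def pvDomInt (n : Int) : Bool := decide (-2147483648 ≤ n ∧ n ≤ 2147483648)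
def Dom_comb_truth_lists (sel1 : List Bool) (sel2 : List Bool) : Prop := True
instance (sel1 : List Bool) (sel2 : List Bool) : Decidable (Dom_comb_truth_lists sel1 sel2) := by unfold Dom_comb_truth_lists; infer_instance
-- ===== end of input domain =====

-- B replaces A's fused sequential scan (counter + in-loop raise + append) by an index-scatter
-- algorithm: collect truthy positions, validate once, allocate all-False output, scatter sel2 in.
-- Objective: alternative. Pre_ excludes the inputs where A raises ValueError.


-- ===== PORT A =====
-- A's for-loop over i with accumulator sel2_combined and counter c; `none` = the raise.
def combA_go (sel2 : List Bool) : List Bool → List Bool → Nat → Option (List Bool)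
  | [], acc, _ => some acc
  | b :: rest, acc, c =>
    if !b then combA_go sel2 rest (acc ++ [false]) c
    else if c < sel2.length then combA_go sel2 rest (acc ++ [sel2.getD c false]) (c + 1)
    else none

def comb_truth_lists (sel1 : List Bool) (sel2 : List Bool) : List Bool :=
  (combA_go sel2 sel1 [] 0).getD []

-- ===== PORT B =====
-- pos = [i for i, x in enumerate(sel1) if x]; validate; out = [False]*len(sel1); scatter by out[i] = v
def combB_pos (sel1 : List Bool) : List Int :=
  ((PySem.List.enumerate sel1).filter (fun p => p.2)).map (fun p => p.1)

def comb_truth_lists_alt (sel1 : List Bool) (sel2 : List Bool) : List Bool :=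
  if (combB_pos sel1).length > sel2.length then []  -- Source B raises ValueError here (outside Pre_)
  else ((combB_pos sel1).zip sel2).foldl (fun acc p => PySem.List.pySetD acc p.1 p.2)
         (List.replicate sel1.length false)

-- ===== PRECONDITION & SPEC =====
-- exactly the inputs on which A returns (A raises ValueError iff sel1 has more trues than sel2 has elements)
def Pre_comb_truth_lists (sel1 : List Bool) (sel2 : List Bool) : Prop :=
  sel1.count true ≤ sel2.length
instance (sel1 : List Bool) (sel2 : List Bool) : Decidable (Pre_comb_truth_lists sel1 sel2) := by unfold Pre_comb_truth_lists; infer_instance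
def pvWitness_comb_truth_lists : List Bool × List Bool := ([true, false, true], [false, true])
def Spec_comb_truth_lists (sel1 : List Bool) (sel2 : List Bool) (out : List Bool) : Prop := out = comb_truth_lists_alt sel1 sel2
instance (sel1 : List Bool) (sel2 : List Bool) (out : List Bool) : Decidable (Spec_comb_truth_lists sel1 sel2 out) := by unfold Spec_comb_truth_lists; infer_instance

-- ===== CLAIM (what is proved, stated in full; the proofs are below) =====
def Claim_equal_comb_truth_lists : Prop := ∀ (sel1 : List Bool) (sel2 : List Bool), Dom_comb_truth_lists sel1 sel2 → Pre_comb_truth_lists sel1 sel2 → Spec_comb_truth_lists sel1 sel2 (comb_truth_lists sel1 sel2)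

-- ===== LEMMAS AND PROOFS =====

-- reference function both sides are reduced to
def combRef : List Bool → List Bool → List Bool
  | [], _ => []
  | b :: rest, s => if b then s.headD false :: combRef rest s.tail
                    else false :: combRef rest s

theorem combA_go_eq_ref (sel2 : List Bool) :
    ∀ (sel1 acc : List Bool) (c : Nat),
      sel1.count true + c ≤ sel2.length →
      combA_go sel2 sel1 acc c = some (acc ++ combRef sel1 (sel2.drop c)) := by
  intro sel1
  induction sel1 with
  | nil => intro acc c _; simp [combA_go, combRef]
  | cons b rest ih =>
    intro acc c h
    cases b with
    | false =>
      simp at h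
      simp [combA_go, combRef, ih (acc ++ [false]) c h]
    | true =>
      simp at h
      have hc : c < sel2.length := by omega
      have h' : rest.count true + (c + 1) ≤ sel2.length := by omega
      have hd : sel2.getD c false = (sel2.drop c).headD false := by
        simp [List.getD_eq_getElem?_getD, List.headD_eq_head?_getD, List.head?_eq_getElem?, List.getElem?_drop]
      have ht : sel2.drop (c + 1) = (sel2.drop c).tail := by simp [List.tail_drop]
      rw [show combA_go sel2 (true :: rest) acc c = combA_go sel2 rest (acc ++ [sel2.getD c false]) (c + 1) by simp [combA_go, hc],
          ih (acc ++ [sel2.getD c false]) (c + 1) h', hd, ht]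
      simp [combRef]

-- Nat-valued positions of the true entries
def natPos : List Bool → List Nat
  | [] => []
  | b :: rest => if b then 0 :: (natPos rest).map (· + 1) else (natPos rest).map (· + 1)

theorem enum_pos_eq (sel1 : List Bool) : ∀ (s : Int),
    (((PySem.List.enumerate sel1 s).filter (fun p => p.2)).map (fun p => p.1))
      = List.map (fun n : Nat => s + (n : Int)) (natPos sel1) := by
  induction sel1 with
  | nil => intro s; simp [PySem.List.enumerate_nil, natPos]
  | cons b rest ih =>
    intro s
    have key : (natPos rest).map (fun n : Nat => (s + 1) + (n : Int))
        = ((natPos rest).map (· + 1)).map (fun n : Nat => s + (n : Int)) := by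
      rw [List.map_map]
      apply List.map_congr_left
      intro n _
      simp only [Function.comp_apply]
      push_cast
      ring
    cases b with
    | false =>
      rw [PySem.List.enumerate_cons, List.filter_cons_of_neg (by simp), ih (s + 1), key]
      simp only [natPos, Bool.false_eq_true, if_false]
    | true =>
      rw [PySem.List.enumerate_cons, List.filter_cons_of_pos (by simp), List.map_cons,
          ih (s + 1), key]
      simp only [natPos, if_true, List.map_cons]
      simp

theorem natPos_length (sel1 : List Bool) : (natPos sel1).length = sel1.count true := by
  induction sel1 with
  | nil => simp [natPos]
  | cons b rest ih => cases b <;> simp [natPos, ih]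

-- scatter with Int indices that are casts of Nats is scatter with List.set
theorem scatter_cast : ∀ (ps : List Nat) (s2 init : List Bool),
    (((List.map (fun n : Nat => (n : Int)) ps).zip s2).foldl
        (fun acc p => PySem.List.pySetD acc p.1 p.2) init)
      = ((ps.zip s2).foldl (fun acc p => acc.set p.1 p.2) init) := by
  intro ps
  induction ps with
  | nil => intro s2 init; simp
  | cons n rest ih =>
    intro s2 init
    cases s2 with
    | nil => simp
    | cons v s2' =>
      simp only [List.map_cons, List.zip_cons_cons, List.foldl_cons,
        PySem.List.pySetD_natCast]
      exact ih s2' (init.set n v)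

-- shifting all scatter indices up by one past a fixed head
theorem scatter_shift (x : Bool) : ∀ (ps : List Nat) (s2 l : List Bool),
    (((ps.map (· + 1)).zip s2).foldl (fun acc p => acc.set p.1 p.2) (x :: l))
      = x :: ((ps.zip s2).foldl (fun acc p => acc.set p.1 p.2) l) := by
  intro ps
  induction ps with
  | nil => intro s2 l; simp
  | cons n rest ih =>
    intro s2 l
    cases s2 with
    | nil => simp
    | cons v s2' =>
      simp only [List.map_cons, List.zip_cons_cons, List.foldl_cons, List.set_cons_succ]
      exact ih s2' (l.set n v)

theorem scatter_eq_ref : ∀ (sel1 sel2 : List Bool),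
    sel1.count true ≤ sel2.length →
    (((natPos sel1).zip sel2).foldl (fun acc p => acc.set p.1 p.2)
        (List.replicate sel1.length false))
      = combRef sel1 sel2 := by
  intro sel1
  induction sel1 with
  | nil => intro sel2 _; simp [natPos, combRef]
  | cons b rest ih =>
    intro sel2 h
    cases b with
    | false =>
      simp only [List.count_cons] at h
      simp only [natPos, Bool.false_eq_true, if_false, List.length_cons,
        List.replicate_succ, combRef]
      rw [scatter_shift, ih sel2 (by simpa using h)]
    | true =>
      simp only [List.count_cons] at h
      cases sel2 with
      | nil => simp at h
      | cons v s2' =>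
        simp only [natPos, if_true, List.length_cons, List.replicate_succ,
          List.zip_cons_cons, List.foldl_cons, List.set_cons_zero]
        rw [scatter_shift, ih s2' (by simp at h; omega)]
        simp [combRef]

theorem combB_pos_eq (sel1 : List Bool) :
    combB_pos sel1 = (natPos sel1).map (fun n : Nat => (n : Int)) := by
  rw [combB_pos, enum_pos_eq sel1 0]
  exact List.map_congr_left (fun n _ => by simp)

-- ===== VERDICT (by name: the statement is the Claim_ definition above) =====
theorem comb_truth_lists_spec : Claim_equal_comb_truth_lists := by
  intro sel1 sel2 _ hpre
  unfold Spec_comb_truth_lists comb_truth_lists comb_truth_lists_alt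
  rw [combA_go_eq_ref sel2 sel1 [] 0 (by simpa using hpre), Option.getD_some,
      List.nil_append, List.drop_zero, combB_pos_eq,
      if_neg (by have hp : sel1.count true ≤ sel2.length := hpre; simp only [List.length_map, natPos_length]; omega),
      scatter_cast, scatter_eq_ref sel1 sel2 hpre]
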